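-- pv_equiv track=rewrite | github.com/alexbaden/neuro-pub-graph | makegraph.py | check_paper
-- ===== SOURCE A (Python) =====
-- def check_paper(paper_id, authors, cur_author):
--   for author in sorted(authors.keys()):
--     if author == cur_author:
--       continue
--     else:
--       for paper in authors[author]:
--         if int(paper) == int(paper_id):
--           return author
--
--   return None
-- ===== SOURCE B (Python) =====
-- def check_paper(paper_id, authors, cur_author):
--     pid = int(paper_id)
--     candidates = [a for a in authors
--                   if a != cur_author and any(int(p) == pid for p in authors[a])]
--     return min(candidates) if candidates else None
-- ===== Notes on version B (the rewrite author's own statement) =====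
-- stated objective: simpler
-- what changed: Replaces A's sort-all-keys-then-scan-with-early-return by one filter pass over the dict followed by min() on the matching authors, removing the O(n log n) sort.
import Mathlib
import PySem

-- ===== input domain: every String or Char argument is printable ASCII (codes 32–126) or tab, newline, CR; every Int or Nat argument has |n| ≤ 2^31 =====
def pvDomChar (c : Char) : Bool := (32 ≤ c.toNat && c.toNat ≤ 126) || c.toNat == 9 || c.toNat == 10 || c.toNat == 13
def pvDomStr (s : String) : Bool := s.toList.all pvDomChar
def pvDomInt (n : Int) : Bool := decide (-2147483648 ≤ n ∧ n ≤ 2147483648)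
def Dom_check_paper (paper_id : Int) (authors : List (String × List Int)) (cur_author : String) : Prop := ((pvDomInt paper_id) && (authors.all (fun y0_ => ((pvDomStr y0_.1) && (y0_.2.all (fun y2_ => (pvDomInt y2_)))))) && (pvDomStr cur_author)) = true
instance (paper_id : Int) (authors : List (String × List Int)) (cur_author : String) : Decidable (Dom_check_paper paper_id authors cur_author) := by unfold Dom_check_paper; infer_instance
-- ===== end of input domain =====

-- B replaces A's sort-then-scan-with-early-return by a filter pass plus min(); equal on every input.

-- ===== PORT A =====
-- inner loop: 'for paper in authors[author]: if int(paper) == int(paper_id): return author' (papers are ints, int() is identity)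
def cpInner (paper_id : Int) : List Int → Bool
  | [] => false
  | p :: ps => if p == paper_id then true else cpInner paper_id ps

-- outer loop over sorted(authors.keys())
def cpOuter (paper_id : Int) (d : PySem.Dict String (List Int)) (cur_author : String) : List String → Option String
  | [] => none
  | a :: rest =>
    if a == cur_author then cpOuter paper_id d cur_author rest
    else if cpInner paper_id (d.getD a []) then some a
    else cpOuter paper_id d cur_author rest

def check_paper (paper_id : Int) (authors : List (String × List Int)) (cur_author : String) : Option String :=
  cpOuter paper_id (PySem.Dict.ofList authors) cur_author
    (PySem.List.sorted (PySem.Dict.ofList authors).keys (fun a => a) false)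

-- ===== PORT B =====
def cpCandidates (paper_id : Int) (d : PySem.Dict String (List Int)) (cur_author : String) : List String :=
  d.keys.filter (fun a => a != cur_author && (d.getD a []).any (fun p => p == paper_id))

def check_paper_alt (paper_id : Int) (authors : List (String × List Int)) (cur_author : String) : Option String :=
  if (cpCandidates paper_id (PySem.Dict.ofList authors) cur_author).isEmpty then none
  else PySem.List.min? (cpCandidates paper_id (PySem.Dict.ofList authors) cur_author) (fun a => a)

-- ===== PRECONDITION & SPEC =====
def Spec_check_paper (paper_id : Int) (authors : List (String × List Int)) (cur_author : String) (out : Option String) : Prop := out = check_paper_alt paper_id authors cur_author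
instance (paper_id : Int) (authors : List (String × List Int)) (cur_author : String) (out : Option String) : Decidable (Spec_check_paper paper_id authors cur_author out) := by unfold Spec_check_paper; infer_instance

-- ===== CLAIM (what is proved, stated in full; the proofs are below) =====
def Claim_equal_check_paper : Prop := ∀ (paper_id : Int) (authors : List (String × List Int)) (cur_author : String), Dom_check_paper paper_id authors cur_author → Spec_check_paper paper_id authors cur_author (check_paper paper_id authors cur_author)

-- ===== LEMMAS AND PROOFS =====

theorem cpInner_eq_any (paper_id : Int) (ps : List Int) :
    cpInner paper_id ps = ps.any (fun p => p == paper_id) := by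
  induction ps with
  | nil => rfl
  | cons p ps ih =>
    simp only [cpInner, List.any_cons]
    by_cases h : p = paper_id <;> simp [h, ih]

-- A's scan returns the first element satisfying q
theorem cpOuter_eq_scan (paper_id : Int) (d : PySem.Dict String (List Int)) (cur : String)
    (l : List String) :
    cpOuter paper_id d cur l =
      (l.filter (fun a => a != cur && (d.getD a []).any (fun p => p == paper_id))).head? := by
  induction l with
  | nil => rfl
  | cons a rest ih =>
    simp only [cpOuter, List.filter_cons]
    by_cases hc : a = cur
    · simp [hc, ih]
    · have : (a != cur) = true := by simp [hc]
      rw [cpInner_eq_any]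
      by_cases hi : (d.getD a []).any (fun p => p == paper_id)
      · simp [hc, this, hi]
      · simp [hc, this, hi, ih]

theorem foldl_min_eq_self {m : String} {t : List String} (h : ∀ y ∈ t, m ≤ y) :
    t.foldl min m = m := by
  induction t with
  | nil => rfl
  | cons y t ih =>
    have hy : m ≤ y := h y (by simp)
    have : min m y = m := min_eq_left hy
    simp only [List.foldl_cons, this]
    exact ih (fun z hz => h z (by simp [hz]))

-- head of a ≤-sorted list is its min
theorem head?_eq_min?_of_pairwise (l : List String) (h : l.Pairwise (· ≤ ·)) :
    l.head? = if l.isEmpty then none else PySem.List.min? l (fun a => a) := by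
  cases l with
  | nil => rfl
  | cons a t =>
    simp only [List.head?_cons, List.isEmpty_cons, PySem.List.min?_id_cons]
    rw [foldl_min_eq_self (List.pairwise_cons.mp h).1]
    rfl

-- min? with the identity key is invariant under permutation
theorem min?_id_perm {l l' : List String} (h : l.Perm l') :
    PySem.List.min? l (fun a => a) = PySem.List.min? l' (fun a => a) := by
  cases hl : PySem.List.min? l (fun a => a) with
  | none =>
    rw [PySem.List.min?_eq_none_iff] at hl
    subst hl
    have : l' = [] := h.symm.eq_nil
    subst this
    rfl
  | some m =>
    cases hl' : PySem.List.min? l' (fun a => a) with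
    | none =>
      rw [PySem.List.min?_eq_none_iff] at hl'
      subst hl'
      have : l = [] := h.eq_nil
      subst this
      exact absurd hl (by simp [PySem.List.min?])
    | some m' =>
      have hm := PySem.List.min?_mem hl
      have hm' := PySem.List.min?_mem hl'
      have h1 : m ≤ m' := PySem.List.min?_isMin hl m' (h.symm.mem_iff.mp hm')
      have h2 : m' ≤ m := PySem.List.min?_isMin hl' m (h.mem_iff.mp hm)
      exact congrArg some (le_antisymm h1 h2)

-- ===== VERDICT (by name: the statement is the Claim_ definition above) =====
theorem check_paper_spec : Claim_equal_check_paper := by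
  intro paper_id authors cur_author _
  unfold Spec_check_paper check_paper check_paper_alt cpCandidates
  have hfp : ((PySem.List.sorted (PySem.Dict.ofList authors).keys (fun a => a) false).filter
      (fun a => a != cur_author && (((PySem.Dict.ofList authors).getD a []).any (fun p => p == paper_id)))).Pairwise (· ≤ ·) :=
    (PySem.List.sorted_pairwise (PySem.Dict.ofList authors).keys (fun a => a)).filter _
  have hperm : ((PySem.List.sorted (PySem.Dict.ofList authors).keys (fun a => a) false).filter
      (fun a => a != cur_author && (((PySem.Dict.ofList authors).getD a []).any (fun p => p == paper_id)))).Perm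
      ((PySem.Dict.ofList authors).keys.filter
      (fun a => a != cur_author && (((PySem.Dict.ofList authors).getD a []).any (fun p => p == paper_id)))) :=
    (PySem.List.sorted_perm (PySem.Dict.ofList authors).keys (fun a => a) false).filter _
  rw [cpOuter_eq_scan, head?_eq_min?_of_pairwise _ hfp, hperm.isEmpty_eq]
  split_ifs
  · rfl
  · exact min?_id_perm hperm
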